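-- pv_equiv track=rewrite | github.com/gabitovanf/project-sokoban-solver | utility_algorithms/BitCount.py | __popcollectposition0
-- ===== SOURCE A (Python) =====
-- def __popcollectposition0(mask, p_list = None):
--     if p_list is None:
--         p_list = []
--     p = 0
--     while (mask > 0):
--         if mask & 1 > 0:
--             p_list.append(p)
--         p += 1
--         mask >>= 1
--
--     return p_list
-- ===== SOURCE B (Python) =====
-- def __popcollectposition0(mask, p_list = None):
--     if p_list is None:
--         p_list = []
--     rev = []
--     while mask > 0:
--         k = mask.bit_length() - 1      # index of the highest set bit
--         rev.append(k)
--         mask -= 1 << k                 # clear the highest set bit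
--     p_list.extend(reversed(rev))
--     return p_list
-- ===== Notes on version B (the rewrite author's own statement) =====
-- stated objective: alternative
-- what changed: Instead of scanning every bit position one by one with shift-by-1, B repeatedly extracts the highest set bit via bit_length and clears it, collecting indices top-down and reversing once, so only set bits are visited (O(popcount) iterations vs O(bit_length)).
import Mathlib
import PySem

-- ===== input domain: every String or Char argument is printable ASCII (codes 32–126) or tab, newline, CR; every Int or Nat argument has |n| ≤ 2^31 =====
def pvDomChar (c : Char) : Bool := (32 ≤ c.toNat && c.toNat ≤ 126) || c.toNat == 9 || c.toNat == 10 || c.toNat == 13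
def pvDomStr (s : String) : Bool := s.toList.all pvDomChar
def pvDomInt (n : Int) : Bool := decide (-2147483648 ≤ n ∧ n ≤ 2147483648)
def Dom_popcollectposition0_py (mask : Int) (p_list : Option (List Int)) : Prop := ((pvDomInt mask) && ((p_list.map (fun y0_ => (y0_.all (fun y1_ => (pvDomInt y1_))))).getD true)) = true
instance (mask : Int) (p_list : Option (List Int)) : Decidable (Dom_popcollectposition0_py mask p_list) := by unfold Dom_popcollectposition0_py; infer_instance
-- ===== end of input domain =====

-- ===== PORT A =====
-- B changes the algorithm only (extract highest set bit top-down instead of scanning all bits);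
-- both Pythons append to the caller's list in place — the equivalence proved here is about the return value.

-- A's while-loop: state (mask, p, p_list); guard mask > 0; 'mask & 1' = Int.land, 'mask >>= 1' = Int shift right.
def pvALoop (mask p : Int) (p_list : List Int) : List Int :=
  if _h : mask > 0 then
    let p_list := if Int.land mask 1 > 0 then p_list ++ [p] else p_list
    pvALoop (mask >>> 1) (p + 1) p_list
  else p_list
termination_by mask.toNat
decreasing_by
  have hm : mask = ((mask.toNat : Nat) : Int) := by omega
  have : (mask >>> 1) = ((mask.toNat >>> 1 : Nat) : Int) := by rw [hm]; rfl
  rw [this]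
  have : mask.toNat >>> 1 = mask.toNat / 2 := by omega
  simp [this]
  omega

def popcollectposition0_py (mask : Int) (p_list : Option (List Int)) : List Int :=
  pvALoop mask 0 (p_list.getD [])

-- ===== PORT B =====
-- B's while-loop: append the index of the highest set bit, then clear it.
-- 'mask.bit_length() - 1' for mask > 0 is Nat.log2 mask.toNat (exact); '1 << k' is 2^k (exact).
def pvBLoop (mask : Int) (rev : List Int) : List Int :=
  if _h : mask > 0 then
    let k : Nat := Nat.log2 mask.toNat
    pvBLoop (mask - ((2 ^ k : Nat) : Int)) (rev ++ [(k : Int)])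
  else rev
termination_by mask.toNat
decreasing_by
  have h0 : mask.toNat ≠ 0 := by omega
  have h1 : 2 ^ Nat.log2 mask.toNat ≤ mask.toNat := Nat.log2_self_le h0
  have h2 : 0 < 2 ^ Nat.log2 mask.toNat := Nat.two_pow_pos _
  omega

def popcollectposition0_py_alt (mask : Int) (p_list : Option (List Int)) : List Int :=
  p_list.getD [] ++ (pvBLoop mask []).reverse

-- ===== PRECONDITION & SPEC =====
def Spec_popcollectposition0_py (mask : Int) (p_list : Option (List Int)) (out : List Int) : Prop := out = popcollectposition0_py_alt mask p_list
instance (mask : Int) (p_list : Option (List Int)) (out : List Int) : Decidable (Spec_popcollectposition0_py mask p_list out) := by unfold Spec_popcollectposition0_py; infer_instance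

-- ===== CLAIM (what is proved, stated in full; the proofs are below) =====
def Claim_equal_popcollectposition0_py : Prop := ∀ (mask : Int) (p_list : Option (List Int)), Dom_popcollectposition0_py mask p_list → Spec_popcollectposition0_py mask p_list (popcollectposition0_py mask p_list)

-- ===== LEMMAS AND PROOFS =====

-- Reference: indices (offset by p) of the set bits of n, lowest first.
def pvBits (n : Nat) (p : Int) : List Int :=
  if h : n = 0 then [] else
    (if n % 2 = 1 then [p] else []) ++ pvBits (n / 2) (p + 1)
termination_by n
decreasing_by exact Nat.div_lt_self (Nat.pos_of_ne_zero h) (by norm_num)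

theorem pvBits_zero (p : Int) : pvBits 0 p = [] := by rw [pvBits]; simp

theorem pvBits_pos (n : Nat) (p : Int) (h : n ≠ 0) :
    pvBits n p = (if n % 2 = 1 then [p] else []) ++ pvBits (n / 2) (p + 1) := by
  conv_lhs => rw [pvBits]
  rw [dif_neg h]

theorem pvALoop_eq (n : Nat) : ∀ (mask p : Int) (acc : List Int), mask.toNat = n →
    pvALoop mask p acc = acc ++ pvBits mask.toNat p := by
  induction n using Nat.strong_induction_on with
  | _ n ih =>
    intro mask p acc hn
    rw [pvALoop]
    by_cases h : mask > 0
    · have hm : mask = ((mask.toNat : Nat) : Int) := by omega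
      have hsh : (mask >>> 1) = ((mask.toNat >>> 1 : Nat) : Int) := by rw [hm]; rfl
      have hdiv : mask.toNat >>> 1 = mask.toNat / 2 := by omega
      have htn : (mask >>> 1).toNat = mask.toNat / 2 := by
        rw [hsh, hdiv]; exact Int.toNat_natCast _
      have hlt : (mask >>> 1).toNat < n := by omega
      have hrec := ih _ hlt (mask >>> 1) (p + 1) acc rfl
      have hrec' := ih _ hlt (mask >>> 1) (p + 1) (acc ++ [p]) rfl
      have hland : Int.land mask 1 = ((Nat.land mask.toNat 1 : Nat) : Int) := by rw [hm]; rfl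
      have hmod : Nat.land mask.toNat 1 = mask.toNat % 2 := Nat.and_one_is_mod _
      rw [dif_pos h]
      rw [pvBits_pos _ _ (by omega : mask.toNat ≠ 0)]
      by_cases hp : mask.toNat % 2 = 1
      · rw [if_pos (by rw [hland, hmod]; exact_mod_cast by omega)]
        rw [if_pos hp]
        rw [hrec', htn]
        simp
      · rw [if_neg (by rw [hland, hmod]; exact_mod_cast by omega)]
        rw [if_neg hp]
        rw [hrec, htn]
        simp
    · rw [dif_neg h]
      have : mask.toNat = 0 := by omega
      rw [this, pvBits_zero]
      simp

-- Adding the bit 2^k on top of m < 2^k appends index p + k to the bit list.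
theorem pvBits_add_pow (k : Nat) : ∀ (m : Nat) (p : Int), m < 2 ^ k →
    pvBits (m + 2 ^ k) p = pvBits m p ++ [p + (k : Int)] := by
  induction k with
  | zero =>
    intro m p hm
    have hm0 : m = 0 := by omega
    subst hm0
    rw [pvBits_pos _ _ (by norm_num)]
    norm_num [pvBits_zero]
  | succ k ih =>
    intro m p hm
    have h2 : (2:Nat) ^ (k + 1) = 2 * 2 ^ k := by ring
    have hne : m + 2 ^ (k + 1) ≠ 0 := by positivity
    have hmod : (m + 2 ^ (k + 1)) % 2 = m % 2 := by omega
    have hdiv : (m + 2 ^ (k + 1)) / 2 = m / 2 + 2 ^ k := by omega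
    have hm2 : m / 2 < 2 ^ k := by omega
    rw [pvBits_pos _ _ hne, hmod, hdiv, ih (m / 2) (p + 1) hm2]
    have hidx : p + 1 + (k : Int) = p + ((k + 1 : Nat) : Int) := by push_cast; ring
    by_cases hm0 : m = 0
    · subst hm0
      rw [pvBits_zero]
      norm_num [pvBits_zero, hidx]
    · rw [pvBits_pos m p hm0]
      rw [hidx]
      simp


theorem pvBLoop_eq (n : Nat) : ∀ (mask : Int) (rev : List Int), mask.toNat = n →
    pvBLoop mask rev = rev ++ (pvBits mask.toNat 0).reverse := by
  induction n using Nat.strong_induction_on with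
  | _ n ih =>
    intro mask rev hn
    rw [pvBLoop]
    by_cases h : mask > 0
    · have h0 : mask.toNat ≠ 0 := by omega
      have h1 : 2 ^ Nat.log2 mask.toNat ≤ mask.toNat := Nat.log2_self_le h0
      have h2 : mask.toNat < 2 ^ (Nat.log2 mask.toNat + 1) := Nat.lt_log2_self
      set k := Nat.log2 mask.toNat with hk
      have hpos : 0 < 2 ^ k := Nat.two_pow_pos _
      have htn : (mask - ((2 ^ k : Nat) : Int)).toNat = mask.toNat - 2 ^ k := by omega
      have hlt : (mask - ((2 ^ k : Nat) : Int)).toNat < n := by omega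
      have hdec : mask.toNat = (mask.toNat - 2 ^ k) + 2 ^ k := by omega
      have hrem : mask.toNat - 2 ^ k < 2 ^ k := by
        have : (2:Nat) ^ (k + 1) = 2 * 2 ^ k := by ring
        omega
      rw [dif_pos h, ih _ hlt _ _ rfl, htn]
      conv_rhs => rw [hdec, pvBits_add_pow k _ 0 hrem]
      simp
    · rw [dif_neg h]
      have : mask.toNat = 0 := by omega
      rw [this, pvBits_zero]
      simp

-- ===== VERDICT (by name: the statement is the Claim_ definition above) =====
theorem popcollectposition0_py_spec : Claim_equal_popcollectposition0_py := by
  intro mask p_list _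
  unfold Spec_popcollectposition0_py popcollectposition0_py popcollectposition0_py_alt
  rw [pvALoop_eq mask.toNat mask 0 _ rfl, pvBLoop_eq mask.toNat mask [] rfl]
  simp
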